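-- pv_equiv track=rewrite | github.com/humayunejaz/EECS4312_Lab5_SpecificationLab_A_219476837 | solution.py | suggest_slots
-- ===== SOURCE A (Python) =====
-- from typing import List, Dict, Tuple
--
-- def _to_minutes(t: str) -> int:
--     """Convert 'HH:MM' -> minutes since midnight."""
--     h, m = t.split(":")
--     return int(h) * 60 + int(m)
--
-- def _to_hhmm(minutes: int) -> str:
--     """Convert minutes since midnight -> 'HH:MM'."""
--     h = minutes // 60
--     m = minutes % 60
--     return f"{h:02d}:{m:02d}"
--
-- def _overlaps(a_start: int, a_end: int, b_start: int, b_end: int) -> bool: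
--     """
--     Return True if half-open intervals [a_start, a_end) and [b_start, b_end) overlap.
--     Boundaries touching is NOT overlap.
--     """
--     return a_start < b_end and b_start < a_end
--
-- def suggest_slots(
--     events: List[Dict[str, str]],
--     meeting_duration: int,
--     day: str
-- ) -> List[str]:
--     """
--     Suggest possible meeting start times for a given day.
--
--     Args:
--         events: List of dicts with keys {"start": "HH:MM", "end": "HH:MM"}
--         meeting_duration: Desired meeting length in minutes
--         day: Day string (tests pass a date like "2026-02-01"; not needed for logic here)
--
--     Returns:
--         List of valid start times as "HH:MM" sorted ascending
--     """
--
--     # Based on tests/constraints: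
--     WORK_START = _to_minutes("09:00")
--     WORK_END = _to_minutes("17:00")
--     LUNCH_START = _to_minutes("12:00")
--     LUNCH_END = _to_minutes("13:00")
--
--     # Slot granularity (tests require 15-minute increments)
--     STEP = 15
--
--     # Buffer after each event ends (tests require 15-minute buffer)
--     BUFFER_AFTER_EVENT = 15
--
--     # Build busy intervals (events within working hours) + lunch
--     busy: List[Tuple[int, int]] = []
--
--     for e in events:
--         s = _to_minutes(e["start"])
--         en = _to_minutes(e["end"])
--
--         # Ignore events completely outside working hours
--         if en <= WORK_START or s >= WORK_END:
--             continue
--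
--         # Clamp start to working hours
--         s = max(s, WORK_START)
--
--         # Add 15-min buffer after event ends, then clamp to working hours
--         en = min(en + BUFFER_AFTER_EVENT, WORK_END)
--
--         if s < en:
--             busy.append((s, en))
--
--     # Lunch break always blocks meetings (no extra buffer mentioned by tests)
--     busy.append((LUNCH_START, LUNCH_END))
--
--     # Sort for cleanliness
--     busy.sort()
--
--     slots: List[str] = []
--     latest_start = WORK_END - meeting_duration
--
--     start = WORK_START
--     while start <= latest_start:
--         end = start + meeting_duration
--
--         conflict = False
--         for bs, be in busy:
--             if _overlaps(start, end, bs, be):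
--                 conflict = True
--                 break
--
--         if not conflict:
--             slots.append(_to_hhmm(start))
--
--         start += STEP
--
--     return slots
-- ===== SOURCE B (Python) =====
-- from typing import List, Dict, Tuple
--
-- def _to_minutes(t: str) -> int:
--     h, m = t.split(":")
--     return int(h) * 60 + int(m)
--
-- def _to_hhmm(minutes: int) -> str:
--     h = minutes // 60
--     m = minutes % 60
--     return f"{h:02d}:{m:02d}"
--
-- def suggest_slots(
--     events: List[Dict[str, str]],
--     meeting_duration: int,
--     day: str
-- ) -> List[str]:
--     """Difference-array re-implementation: map each busy interval to a contiguous
--     range of conflicting 15-min grid indices, accumulate +1/-1 marks, then emit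
--     every grid start whose running conflict count is zero. O(n + G) instead of
--     O(n * G)."""
--     WORK_START = _to_minutes("09:00")
--     WORK_END = _to_minutes("17:00")
--     LUNCH_START = _to_minutes("12:00")
--     LUNCH_END = _to_minutes("13:00")
--     STEP = 15
--     BUFFER_AFTER_EVENT = 15
--
--     busy: List[Tuple[int, int]] = []
--     for e in events:
--         s = _to_minutes(e["start"])
--         en = _to_minutes(e["end"])
--         if en <= WORK_START or s >= WORK_END:
--             continue
--         s = max(s, WORK_START)
--         en = min(en + BUFFER_AFTER_EVENT, WORK_END)
--         if s < en:
--             busy.append((s, en))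
--     busy.append((LUNCH_START, LUNCH_END))
--
--     # grid start k (0-based) is WORK_START + STEP*k; valid while <= WORK_END - duration
--     G = (WORK_END - meeting_duration - WORK_START) // STEP + 1
--     diff = [0] * (G + 1)
--     for bs, be in busy:
--         # start conflicts with (bs, be) iff bs - duration < start < be
--         klo = max(0, (bs - meeting_duration - WORK_START) // STEP + 1)
--         khi = min(G - 1, (be - 1 - WORK_START) // STEP)
--         if klo <= khi:
--             diff[klo] += 1
--             diff[khi + 1] -= 1
--
--     out: List[str] = []
--     c = 0
--     for k in range(G):
--         c += diff[k]
--         if c == 0: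
--             out.append(_to_hhmm(WORK_START + STEP * k))
--     return out
-- ===== Notes on version B (the rewrite author's own statement) =====
-- stated objective: faster
-- what changed: Instead of scanning the whole busy list for every 15-minute grid start, B maps each busy interval once to its contiguous range of conflicting grid indices, accumulates +1/-1 marks in a difference array, and emits every grid start whose running conflict count is zero.
import Mathlib
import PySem

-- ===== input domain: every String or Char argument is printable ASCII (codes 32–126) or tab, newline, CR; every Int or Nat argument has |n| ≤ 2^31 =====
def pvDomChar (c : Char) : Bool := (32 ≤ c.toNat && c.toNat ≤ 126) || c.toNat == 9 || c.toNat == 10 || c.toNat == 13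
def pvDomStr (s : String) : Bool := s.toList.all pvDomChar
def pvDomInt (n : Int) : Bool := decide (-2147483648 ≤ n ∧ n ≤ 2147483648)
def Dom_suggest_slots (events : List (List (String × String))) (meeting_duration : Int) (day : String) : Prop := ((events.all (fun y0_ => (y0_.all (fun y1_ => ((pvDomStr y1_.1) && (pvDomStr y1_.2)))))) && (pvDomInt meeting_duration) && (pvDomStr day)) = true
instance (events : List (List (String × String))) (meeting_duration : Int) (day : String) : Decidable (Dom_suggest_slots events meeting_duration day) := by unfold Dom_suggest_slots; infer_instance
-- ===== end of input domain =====

-- B replaces A's per-grid-start scan of the busy list by a difference array over grid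
-- indices (each busy interval marks one contiguous index range once), making it O(n+G)
-- instead of O(n*G); equal output is proved on Pre_ (inputs where A returns).

-- ===== PORT A =====
-- _to_minutes (defined identically in Source A and Source B).  Python raises (ValueError /
-- unpack error) when t does not split on ":" into two int()-parseable parts; Pre_
-- excludes those inputs, so the getD defaults below are never reached under Pre_.
def pvToMin (t : String) : Int :=
  match (PySem.Str.split? t ":").getD [] with
  | [h, m] => (PySem.Int.ofStr? h).getD 0 * 60 + (PySem.Int.ofStr? m).getD 0
  | _ => 0

-- _to_hhmm (identical in Source A and Source B): f"{h:02d}:{m:02d}"; the zfill form is exact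
-- here because both programs only call it with minutes ≥ 540, so h, m ≥ 0.
def pvToHHMM (minutes : Int) : String :=
  PySem.Str.join ":" [PySem.Str.zfill (PySem.Int.toStr (PySem.Int.floordiv minutes 60)) 2,
                      PySem.Str.zfill (PySem.Int.toStr (PySem.Int.mod minutes 60)) 2]

-- the module constants WORK_START/WORK_END/LUNCH_START/LUNCH_END (same in both files)
def pvWS : Int := pvToMin "09:00"
def pvWE : Int := pvToMin "17:00"
def pvLS : Int := pvToMin "12:00"
def pvLE : Int := pvToMin "13:00"

-- the busy-interval build loop, textually identical in Source A and Source B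
def pvBuildBusy (events : List (List (String × String))) (ws we : Int) : List (Int × Int) :=
  events.foldl (fun busy e =>
    let s := pvToMin (((PySem.Dict.mk e).get? "start").getD "")
    let en := pvToMin (((PySem.Dict.mk e).get? "end").getD "")
    if en ≤ ws || s ≥ we then busy
    else
      let s' := max s ws
      let en' := min (en + 15) we
      if s' < en' then busy ++ [(s', en')] else busy) []

def pvOverlaps (aS aE bS bE : Int) : Bool := decide (aS < bE) && decide (bS < aE)

-- A's while loop: scan every grid start, checking the whole busy list each time
def pvLoopA (busy : List (Int × Int)) (dur latest start : Int) (slots : List String) : List String :=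
  if _h : start ≤ latest then
    pvLoopA busy dur latest (start + 15)
      (if busy.any (fun b => pvOverlaps start (start + dur) b.1 b.2) then slots
       else slots ++ [pvToHHMM start])
  else slots
termination_by (latest + 1 - start).toNat
decreasing_by omega

def suggest_slots (events : List (List (String × String))) (meeting_duration : Int) (day : String) : List String :=
  pvLoopA (PySem.List.sorted2 (pvBuildBusy events pvWS pvWE ++ [(pvLS, pvLE)]) (·.1) (·.2) false)
    meeting_duration (pvWE - meeting_duration) pvWS []

-- ===== PORT B =====
-- number of grid starts: WORK_START + 15*k is a candidate for 0 ≤ k < G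
def pvG (m : Int) : Int := PySem.Int.floordiv (pvWE - m - pvWS) 15 + 1

-- d[i] += c  (indices produced by pvMark are always in range)
def pvAddAt (d : List Int) (i c : Int) : List Int :=
  PySem.List.pySetD d i (PySem.List.pyGetD d i 0 + c)

def pvKlo (m bs : Int) : Int := max 0 (PySem.Int.floordiv (bs - m - pvWS) 15 + 1)
def pvKhi (G be : Int) : Int := min (G - 1) (PySem.Int.floordiv (be - 1 - pvWS) 15)

-- one step of Source B's marking loop: grid start k conflicts with (bs, be) iff bs - m < start < be
def pvMark (m G : Int) (d : List Int) (b : Int × Int) : List Int :=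
  if pvKlo m b.1 ≤ pvKhi G b.2 then pvAddAt (pvAddAt d (pvKlo m b.1) 1) (pvKhi G b.2 + 1) (-1) else d

-- Source B's final loop: running conflict count c; emit the grid start when c == 0
def pvScan (diff : List Int) (G : Int) : List String :=
  ((PySem.List.pyRange 0 G 1).foldl (fun st k =>
      let c := st.1 + PySem.List.pyGetD diff k 0
      (c, if c == 0 then st.2 ++ [pvToHHMM (pvWS + 15 * k)] else st.2))
    ((0 : Int), ([] : List String))).2

def suggest_slots_alt (events : List (List (String × String))) (meeting_duration : Int) (day : String) : List String :=
  pvScan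
    ((pvBuildBusy events pvWS pvWE ++ [(pvLS, pvLE)]).foldl
      (pvMark meeting_duration (pvG meeting_duration))
      (List.replicate (pvG meeting_duration + 1).toNat 0))
    (pvG meeting_duration)

-- ===== PRECONDITION & SPEC =====
def pvParses (t : String) : Bool :=
  match (PySem.Str.split? t ":").getD [] with
  | [h, m] => (PySem.Int.ofStr? h).isSome && (PySem.Int.ofStr? m).isSome
  | _ => false

-- Pre_ excludes exactly the inputs where A raises: an event missing a "start"/"end"
-- key (KeyError) or whose value does not split on ":" into two int()-parseable parts
-- (ValueError / unpacking error).  A returns on every input admitted here.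
def Pre_suggest_slots (events : List (List (String × String))) (meeting_duration : Int) (day : String) : Prop :=
  (events.all (fun e =>
    (match (PySem.Dict.mk e).get? "start" with | some t => pvParses t | none => false) &&
    (match (PySem.Dict.mk e).get? "end" with | some t => pvParses t | none => false))) = true
instance (events : List (List (String × String))) (meeting_duration : Int) (day : String) : Decidable (Pre_suggest_slots events meeting_duration day) := by unfold Pre_suggest_slots; infer_instance

def pvWitness_suggest_slots : (List (List (String × String))) × Int × String :=
  ([[("start", "10:00"), ("end", "11:00")]], 30, "2026-02-01")

def Spec_suggest_slots (events : List (List (String × String))) (meeting_duration : Int) (day : String) (out : List String) : Prop := out = suggest_slots_alt events meeting_duration day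
instance (events : List (List (String × String))) (meeting_duration : Int) (day : String) (out : List String) : Decidable (Spec_suggest_slots events meeting_duration day out) := by unfold Spec_suggest_slots; infer_instance

-- ===== CLAIM (what is proved, stated in full; the proofs are below) =====
def Claim_equal_suggest_slots : Prop := ∀ (events : List (List (String × String))) (meeting_duration : Int) (day : String), Dom_suggest_slots events meeting_duration day → Pre_suggest_slots events meeting_duration day → Spec_suggest_slots events meeting_duration day (suggest_slots events meeting_duration day)

-- ===== LEMMAS AND PROOFS =====
theorem pvWS_eq : pvWS = 540 := by decide
theorem pvWE_eq : pvWE = 1020 := by decide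
-- bracket for floordiv by 15
theorem pvFd15 (x : Int) :
    15 * PySem.Int.floordiv x 15 ≤ x ∧ x < 15 * PySem.Int.floordiv x 15 + 15 := by
  have h1 := PySem.Int.floordiv_mul_add_mod x 15
  have h2 := PySem.Int.mod_nonneg x (b := 15) (by norm_num)
  have h3 := PySem.Int.mod_lt x (b := 15) (by norm_num)
  omega

theorem pvConflictCovers (m : Int) (b : Int × Int) (k : Int) (hk : 0 ≤ k) (hkG : k < pvG m) :
    pvOverlaps (540 + 15 * k) (540 + 15 * k + m) b.1 b.2
      = decide (pvKlo m b.1 ≤ k ∧ k ≤ pvKhi (pvG m) b.2) := by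
  have h1 := pvFd15 (b.1 - m - 540)
  have h2 := pvFd15 (b.2 - 1 - 540)
  have h3 : k ≤ pvG m - 1 := by omega
  unfold pvOverlaps pvKlo pvKhi
  rw [pvWS_eq, ← Bool.decide_and]
  apply decide_eq_decide.mpr
  constructor
  · rintro ⟨ha, hb⟩
    refine ⟨max_le_iff.mpr ⟨hk, by omega⟩, le_min_iff.mpr ⟨h3, by omega⟩⟩
  · rintro ⟨ha, hb⟩
    have ha' := max_le_iff.mp ha
    have hb' := le_min_iff.mp hb
    exact ⟨by omega, by omega⟩

-- pvLoopA's result as a filterMap over the grid-index range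
theorem pvLoopA_eq (bz : List (Int × Int)) (m : Int) (k : Int) (slots : List String) (hk : 0 ≤ k) :
    pvLoopA bz m (1020 - m) (540 + 15 * k) slots
      = slots ++ (PySem.List.pyRange k (pvG m) 1).filterMap
          (fun j => if bz.any (fun b => pvOverlaps (540 + 15 * j) (540 + 15 * j + m) b.1 b.2)
                    then none else some (pvToHHMM (540 + 15 * j))) := by
  have hGk : pvG m = PySem.Int.floordiv (1020 - m - 540) 15 + 1 := by
    unfold pvG; rw [pvWS_eq, pvWE_eq]
  have hbr := pvFd15 (1020 - m - 540)
  by_cases h : 540 + 15 * k ≤ 1020 - m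
  · have hkG : k < pvG m := by omega
    rw [pvLoopA, dif_pos h]
    have e15 : 540 + 15 * k + 15 = 540 + 15 * (k + 1) := by ring
    rw [e15, pvLoopA_eq bz m (k + 1) _ (by omega),
        PySem.List.pyRange_one_cons hkG, List.filterMap_cons]
    by_cases hc : bz.any (fun b => pvOverlaps (540 + 15 * k) (540 + 15 * k + m) b.1 b.2) = true
    · simp [hc]
    · simp [hc, List.append_assoc]
  · have hkG : pvG m ≤ k := by omega
    rw [pvLoopA, dif_neg h, PySem.List.pyRange_one_eq_nil hkG]
    simp
termination_by (pvG m - k).toNat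
decreasing_by omega

-- prefix sums of the difference array
def pvS (d : List Int) (n : Nat) : Int := (d.take n).sum

theorem sum_take_set (d : List Int) (j : Nat) (x : Int) (n : Nat) (h : j < d.length) :
    ((d.set j x).take n).sum = (d.take n).sum + (if j < n then x - d[j] else 0) := by
  induction d generalizing j n with
  | nil => simp at h
  | cons a t ih =>
    cases j with
    | zero =>
      cases n with
      | zero => simp
      | succ n => simp [List.set, List.take_succ_cons]; ring
    | succ j =>
      cases n with
      | zero => simp
      | succ n =>
        simp only [List.set, List.take_succ_cons, List.sum_cons, List.getElem_cons_succ]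
        rw [ih j n (by simpa using h)]
        by_cases hjn : j < n
        · simp [hjn]
          ring
        · simp [hjn]

theorem pvS_addAt (d : List Int) (i c : Int) (n : Nat) (h0 : 0 ≤ i) (h1 : i < (d.length : Int)) :
    pvS (pvAddAt d i c) n = pvS d n + (if i < (n : Int) then c else 0) := by
  have hj : i.toNat < d.length := by omega
  have hget : PySem.List.pyGetD d i 0 = d[i.toNat] := by
    rw [PySem.List.pyGetD_of_nonneg d 0 h0]
    exact List.getD_eq_getElem d 0 hj
  rw [pvS, pvAddAt, PySem.List.pySetD_of_nonneg d _ h0, hget,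
    sum_take_set d i.toNat _ n hj]
  simp only [pvS]
  split_ifs with hc hc2 hc2 <;> omega

theorem pvMark_length (m G : Int) (d : List Int) (b : Int × Int) :
    (pvMark m G d b).length = d.length := by
  unfold pvMark pvAddAt
  split <;> simp [PySem.List.length_pySetD]

theorem pvS_mark (m G : Int) (d : List Int) (b : Int × Int) (k : Int)
    (hlen : (d.length : Int) = G + 1) (hk : 0 ≤ k) (_hkG : k < G) :
    pvS (pvMark m G d b) (k + 1).toNat
      = pvS d (k + 1).toNat + (if pvKlo m b.1 ≤ k ∧ k ≤ pvKhi G b.2 then 1 else 0) := by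
  have hklo0 : 0 ≤ pvKlo m b.1 := le_max_left _ _
  have hkhiG : pvKhi G b.2 ≤ G - 1 := min_le_left _ _
  unfold pvMark
  split
  · next hle =>
    rw [pvS_addAt _ _ _ _ (by omega) (by rw [pvAddAt, PySem.List.length_pySetD]; omega),
        pvS_addAt _ _ _ _ hklo0 (by omega)]
    have hcast : ((k + 1).toNat : Int) = k + 1 := by omega
    split_ifs <;> omega
  · next hnle =>
    have : ¬ (pvKlo m b.1 ≤ k ∧ k ≤ pvKhi G b.2) := by omega
    simp [this]

theorem pvS_fold (m G : Int) (bz : List (Int × Int)) (d : List Int) (k : Int)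
    (hlen : (d.length : Int) = G + 1) (hk : 0 ≤ k) (hkG : k < G) :
    pvS (bz.foldl (pvMark m G) d) (k + 1).toNat
      = pvS d (k + 1).toNat
        + ((bz.countP (fun b => decide (pvKlo m b.1 ≤ k ∧ k ≤ pvKhi G b.2))) : Int) := by
  induction bz generalizing d with
  | nil => simp
  | cons b t ih =>
    rw [List.foldl_cons, ih _ (by rw [pvMark_length]; omega),
        pvS_mark m G d b k hlen hk hkG, List.countP_cons]
    push_cast
    simp only [decide_eq_true_eq]
    split_ifs with h
    · ring
    · ring

theorem pvFold_length (m G : Int) (bz : List (Int × Int)) (d : List Int) :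
    (bz.foldl (pvMark m G) d).length = d.length := by
  induction bz generalizing d with
  | nil => rfl
  | cons b t ih => rw [List.foldl_cons, ih, pvMark_length]

-- the scan loop as a filterMap over the grid-index range
theorem pvScan_eq (diff : List Int) (G a : Int) (out : List String)
    (hlen : G ≤ (diff.length : Int)) (ha : 0 ≤ a) :
    ((PySem.List.pyRange a G 1).foldl (fun st k =>
        let c := st.1 + PySem.List.pyGetD diff k 0
        (c, if c == 0 then st.2 ++ [pvToHHMM (540 + 15 * k)] else st.2))
      (pvS diff a.toNat, out)).2
    = out ++ (PySem.List.pyRange a G 1).filterMap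
        (fun k => if pvS diff (k + 1).toNat = 0 then some (pvToHHMM (540 + 15 * k)) else none) := by
  by_cases h : a < G
  · have hj : a.toNat < diff.length := by omega
    have hc : pvS diff a.toNat + PySem.List.pyGetD diff a 0 = pvS diff (a + 1).toNat := by
      rw [PySem.List.pyGetD_of_nonneg diff 0 ha, List.getD_eq_getElem diff 0 hj]
      have e : (a + 1).toNat = a.toNat + 1 := by omega
      rw [e, pvS, pvS, List.sum_take_succ _ _ hj]
    have happ : (let c := (pvS diff a.toNat, out).1 + PySem.List.pyGetD diff a 0;
          (c, if c == 0 then (pvS diff a.toNat, out).2 ++ [pvToHHMM (540 + 15 * a)]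
              else (pvS diff a.toNat, out).2))
        = (pvS diff (a + 1).toNat,
            if pvS diff (a + 1).toNat = 0 then out ++ [pvToHHMM (540 + 15 * a)] else out) := by
      dsimp only
      rw [hc]
      simp [beq_iff_eq]
    rw [PySem.List.pyRange_one_cons h, List.foldl_cons, happ,
        pvScan_eq diff G (a + 1) _ hlen (by omega), List.filterMap_cons]
    by_cases hz : pvS diff (a + 1).toNat = 0
    · simp [hz, List.append_assoc]
    · simp [hz]
  · rw [PySem.List.pyRange_one_eq_nil (by omega)]
    simp
termination_by (G - a).toNat
decreasing_by omega

theorem pvAny_sorted (bz : List (Int × Int)) (p : Int × Int → Bool) :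
    (PySem.List.sorted2 bz (·.1) (·.2) false).any p = bz.any p :=
  List.Perm.any_eq (PySem.List.sorted2_perm bz (·.1) (·.2) false)

-- ===== VERDICT (by name: the statement is the Claim_ definition above) =====
theorem suggest_slots_spec : Claim_equal_suggest_slots := by
  intro events m day _hdom _hpre
  show suggest_slots events m day = suggest_slots_alt events m day
  unfold suggest_slots suggest_slots_alt pvScan
  set bz := pvBuildBusy events pvWS pvWE ++ [(pvLS, pvLE)] with hbz
  set diffF := bz.foldl (pvMark m (pvG m)) (List.replicate (pvG m + 1).toNat 0) with hdiff
  have hlen : (diffF.length : Int) = (pvG m + 1).toNat := by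
    rw [hdiff, pvFold_length, List.length_replicate]
  rw [pvWE_eq, pvWS_eq]
  conv_lhs => rw [show (540 : Int) = 540 + 15 * 0 by norm_num]
  rw [pvLoopA_eq _ m 0 [] le_rfl]
  have hscan := pvScan_eq diffF (pvG m) 0 [] (by omega) le_rfl
  rw [show pvS diffF (Int.toNat 0) = 0 from by simp [pvS]] at hscan
  rw [hscan]
  simp only [List.nil_append]
  apply List.filterMap_congr
  intro j hj
  obtain ⟨hj0, hjG⟩ := PySem.List.mem_pyRange_one.mp hj
  have hrepl : pvS (List.replicate (pvG m + 1).toNat 0) (j + 1).toNat = 0 := by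
    simp [pvS]
  have hcount : pvS diffF (j + 1).toNat
      = ((bz.countP (fun b => decide (pvKlo m b.1 ≤ j ∧ j ≤ pvKhi (pvG m) b.2))) : Int) := by
    rw [hdiff, pvS_fold m (pvG m) bz _ j (by rw [List.length_replicate]; omega) hj0 hjG, hrepl,
        zero_add]
  have hany : (PySem.List.sorted2 bz (·.1) (·.2) false).any
        (fun b => pvOverlaps (540 + 15 * j) (540 + 15 * j + m) b.1 b.2)
      = bz.any (fun b => decide (pvKlo m b.1 ≤ j ∧ j ≤ pvKhi (pvG m) b.2)) := by
    rw [pvAny_sorted]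
    exact PySem.List.any_congr_mem (fun b _ => pvConflictCovers m b j hj0 hjG)
  rw [hany]
  by_cases hcase : bz.any (fun b => decide (pvKlo m b.1 ≤ j ∧ j ≤ pvKhi (pvG m) b.2)) = true
  · have hpos : 0 < bz.countP (fun b => decide (pvKlo m b.1 ≤ j ∧ j ≤ pvKhi (pvG m) b.2)) := by
      obtain ⟨b, hb, hpb⟩ := List.any_eq_true.mp hcase
      exact List.countP_pos_iff.mpr ⟨b, hb, hpb⟩
    have : ¬ pvS diffF (j + 1).toNat = 0 := by omega
    rw [if_pos hcase, if_neg this]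
  · have hzero : bz.countP (fun b => decide (pvKlo m b.1 ≤ j ∧ j ≤ pvKhi (pvG m) b.2)) = 0 := by
      rw [List.countP_eq_zero]
      intro b hb
      exact fun hpb => hcase (List.any_eq_true.mpr ⟨b, hb, hpb⟩)
    have : pvS diffF (j + 1).toNat = 0 := by omega
    rw [if_neg hcase, if_pos this]
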